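-- pv_equiv track=rewrite | github.com/eltobrgs/algorithms-exercises | Funçoes em python/funçoes para chamar/mylibralyoffunctions.py | eh_o_maior
-- ===== SOURCE A (Python) =====
-- def eh_o_maior(numero, lista):
--     maior = lista[0]
--     for num in lista:
--         if num > maior:
--             maior = num
--     if numero == maior:
--         return True
--     else:
--         return False
-- ===== SOURCE B (Python) =====
-- def eh_o_maior(numero, lista):
--     return numero == sorted(lista)[-1]
-- ===== Notes on version B (the rewrite author's own statement) =====
-- stated objective: alternative
-- what changed: B sorts the list and reads the maximum off the last position instead of A's linear scan with a running max and explicit if/else returning True/False.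
import Mathlib
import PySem

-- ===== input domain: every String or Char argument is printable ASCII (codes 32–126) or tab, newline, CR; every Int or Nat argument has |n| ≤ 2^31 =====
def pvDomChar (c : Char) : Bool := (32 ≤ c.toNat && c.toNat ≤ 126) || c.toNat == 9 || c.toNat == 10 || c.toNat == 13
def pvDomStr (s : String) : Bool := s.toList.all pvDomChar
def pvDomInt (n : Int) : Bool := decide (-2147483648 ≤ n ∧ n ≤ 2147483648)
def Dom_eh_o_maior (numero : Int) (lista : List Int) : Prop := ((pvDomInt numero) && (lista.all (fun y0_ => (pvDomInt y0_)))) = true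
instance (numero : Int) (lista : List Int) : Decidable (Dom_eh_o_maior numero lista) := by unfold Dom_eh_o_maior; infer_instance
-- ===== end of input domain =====

-- B sorts the list and takes the last element as the maximum instead of A's running-max scan (alternative decomposition, not faster).


-- ===== PORT A =====
-- maior = lista[0] (IndexError on []); then a running max over lista; if numero == maior then True else False
def eh_o_maior (numero : Int) (lista : List Int) : Bool :=
  match PySem.List.pyGet? lista 0 with
  | none => false  -- IndexError on []; excluded by Pre_
  | some maior0 =>
    let maior := lista.foldl (fun maior num => if num > maior then num else maior) maior0
    if numero == maior then true else false

-- ===== PORT B =====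
-- return numero == sorted(lista)[-1]
def eh_o_maior_alt (numero : Int) (lista : List Int) : Bool :=
  match PySem.List.pyGet? (PySem.List.sorted lista (fun x => x) false) (-1) with
  | none => false  -- IndexError on []; excluded by Pre_
  | some m => numero == m

-- ===== PRECONDITION & SPEC =====
-- A raises IndexError on the empty list (lista[0]); B also raises there (sorted([])[-1]).
def Pre_eh_o_maior (numero : Int) (lista : List Int) : Prop := lista ≠ []
instance (numero : Int) (lista : List Int) : Decidable (Pre_eh_o_maior numero lista) := by unfold Pre_eh_o_maior; infer_instance
def pvWitness_eh_o_maior : Int × List Int := (3, [1, 3, 2])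

def Spec_eh_o_maior (numero : Int) (lista : List Int) (out : Bool) : Prop := out = eh_o_maior_alt numero lista
instance (numero : Int) (lista : List Int) (out : Bool) : Decidable (Spec_eh_o_maior numero lista out) := by unfold Spec_eh_o_maior; infer_instance

-- ===== CLAIM (what is proved, stated in full; the proofs are below) =====
def Claim_equal_eh_o_maior : Prop := ∀ (numero : Int) (lista : List Int), Dom_eh_o_maior numero lista → Pre_eh_o_maior numero lista → Spec_eh_o_maior numero lista (eh_o_maior numero lista)

-- ===== LEMMAS AND PROOFS =====

-- A's running max over h :: t is the foldl of max
theorem foldl_if_eq_foldl_max (t : List Int) (a : Int) :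
    t.foldl (fun maior num => if num > maior then num else maior) a = t.foldl max a := by
  induction t generalizing a with
  | nil => rfl
  | cons x t ih =>
    simp only [List.foldl_cons, ih]
    congr 1
    by_cases h : x > a <;> simp [h] <;> omega

-- the last element of sorted (h :: t) is the running max
theorem getLast?_sorted (h : Int) (t : List Int) :
    (PySem.List.sorted (h :: t) (fun x => x) false).getLast? = some ((h :: t).foldl max h) := by
  have hne : PySem.List.sorted (h :: t) (fun x => x) false ≠ [] := by
    intro hc
    have := (PySem.List.sorted_eq_nil_iff (xs := h :: t) (key := fun x => x) (rev := false)).mp hc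
    simp at this
  obtain ⟨ys, m, hsplit⟩ : ∃ ys m, PySem.List.sorted (h :: t) (fun x => x) false = ys ++ [m] := by
    rcases (PySem.List.sorted (h :: t) (fun x => x) false).eq_nil_or_concat with hc | hc
    · exact absurd hc hne
    · simpa [List.concat_eq_append] using hc
  have hlast : (PySem.List.sorted (h :: t) (fun x => x) false).getLast? = some m := by
    rw [hsplit]; simp
  rw [hlast]
  -- m is a member of h :: t
  have hmem : m ∈ (h :: t) := by
    have : m ∈ PySem.List.sorted (h :: t) (fun x => x) false := by
      rw [hsplit]; simp
    rwa [PySem.List.mem_sorted] at this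
  -- m is ≥ every element of h :: t (sorted_pairwise + last position)
  have hge : ∀ y ∈ (h :: t), y ≤ m := by
    intro y hy
    have hy' : y ∈ PySem.List.sorted (h :: t) (fun x => x) false := by
      rwa [PySem.List.mem_sorted]
    rw [hsplit] at hy'
    rcases List.mem_append.mp hy' with h1 | h2
    · have hp := PySem.List.sorted_pairwise (xs := h :: t) (key := fun x => x)
      rw [hsplit] at hp
      have := List.pairwise_append.mp hp
      exact this.2.2 y h1 m (by simp)
    · simp at h2; omega
  -- the running max: h ≤ F, ∀ y ∈ t, y ≤ F, F ∈ h :: t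
  have hF := PySem.List.le_foldl_max t h
  have hFmem : t.foldl max h ∈ (h :: t) := by
    rcases PySem.List.foldl_max_mem t h with h1 | h1
    · simp [h1]
    · simp [h1]
  have e1 : (h :: t).foldl max h = t.foldl max h := by simp
  rw [e1]
  congr 1
  apply le_antisymm
  · rcases List.mem_cons.mp hmem with hm | hm
    · subst hm; exact hF.1
    · exact hF.2 m hm
  · exact hge _ hFmem

-- ===== VERDICT (by name: the statement is the Claim_ definition above) =====
theorem eh_o_maior_spec : Claim_equal_eh_o_maior := by
  intro numero lista _ hpre
  obtain ⟨h, t, rfl⟩ := List.exists_cons_of_ne_nil hpre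
  unfold Spec_eh_o_maior eh_o_maior eh_o_maior_alt
  rw [PySem.List.pyGet?_neg_one, getLast?_sorted]
  simp only [PySem.List.pyGet?_zero_cons]
  rw [foldl_if_eq_foldl_max]
  by_cases hn : numero == (h :: t).foldl max h <;> simp_all
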